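-- pv_equiv track=rewrite | github.com/fecgov/openFEC | webservices/es_bulk/processors/denormalization.py | get_dictionaries_for_key
-- ===== SOURCE A (Python) =====
-- def get_dictionaries_for_key(iterable, key, name='name', value='value'):
--     res = {}
--     for row in iterable:
--         current_key = row[key]
--         current_name = row[name]
--         current_value = row[value]
--         if current_key not in res:
--             res[current_key] = {current_name: [current_value]}
--         elif current_name in res[current_key]:
--             res[current_key][current_name] += [current_value]
--         else:
--             res[current_key].update({current_name: [current_value]})
--     return res
-- ===== SOURCE B (Python) =====
-- def get_dictionaries_for_key(iterable, key, name='name', value='value'):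
--     flat = {}
--     for row in iterable:
--         flat.setdefault((row[key], row[name]), []).append(row[value])
--     res = {}
--     for (k, n), vals in flat.items():
--         res.setdefault(k, {})[n] = vals
--     return res
-- ===== Notes on version B (the rewrite author's own statement) =====
-- stated objective: alternative
-- what changed: Replaces A's three-way branch that maintains the nested dict incrementally with two differently-shaped passes: a first pass groups values into a flat dict keyed by the (key, name) tuple, and a second pass over that flat dict's items assembles the nested structure.
import Mathlib
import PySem

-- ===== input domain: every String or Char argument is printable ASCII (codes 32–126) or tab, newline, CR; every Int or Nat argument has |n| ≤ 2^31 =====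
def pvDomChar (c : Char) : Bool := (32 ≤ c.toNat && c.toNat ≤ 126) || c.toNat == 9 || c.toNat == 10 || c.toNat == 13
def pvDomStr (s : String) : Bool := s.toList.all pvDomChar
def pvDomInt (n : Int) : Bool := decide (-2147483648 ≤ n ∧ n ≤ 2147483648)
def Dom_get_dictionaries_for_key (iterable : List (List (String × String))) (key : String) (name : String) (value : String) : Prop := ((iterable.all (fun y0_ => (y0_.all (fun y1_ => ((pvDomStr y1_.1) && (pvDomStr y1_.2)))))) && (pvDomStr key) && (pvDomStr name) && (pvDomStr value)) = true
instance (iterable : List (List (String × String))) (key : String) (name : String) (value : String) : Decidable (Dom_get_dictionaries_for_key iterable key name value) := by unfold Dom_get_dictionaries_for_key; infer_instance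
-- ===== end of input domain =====

-- B replaces A's three-way incremental nested-dict update by two passes: a flat dict keyed by the
-- (key, name) pair built first, then reshaped into the nested dict; same cost, different decomposition.


-- ===== PORT A =====
-- a Python row is a dict; rows arrive as association lists, so each is rebuilt as a PySem.Dict
-- (duplicate keys: last occurrence wins, exactly like Python's dict constructor)
def pvRowA (row : List (String × String)) : PySem.Dict String String := PySem.Dict.ofList row

-- literal transliteration of A: one fold maintaining the nested dict with A's three branches;
-- rows on which Python would raise KeyError (a missing key) leave the state unchanged (outside Pre_)
def get_dictionaries_for_key (iterable : List (List (String × String))) (key : String) (name : String) (value : String) : List (String × List (String × List String)) :=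
  (iterable.foldl (fun res row =>
      match (pvRowA row).get? key, (pvRowA row).get? name, (pvRowA row).get? value with
      | some ck, some cn, some cv =>
        if res.contains ck = false then
          res.insert ck (PySem.Dict.ofList [(cn, [cv])])
        else if (res.getD ck PySem.Dict.empty).contains cn then
          res.modify ck PySem.Dict.empty (fun d => d.modify cn [] (· ++ [cv]))
        else
          res.modify ck PySem.Dict.empty (fun d => d.insert cn [cv])
      | _, _, _ => res)
    (PySem.Dict.empty : PySem.Dict String (PySem.Dict String (List String)))).items.map
    (fun p => (p.1, p.2.items))

-- ===== PORT B =====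
-- B's copy of the row-as-dict view (each port carries its own helpers)
def pvRowB (row : List (String × String)) : PySem.Dict String String := PySem.Dict.ofList row

-- literal transliteration of B (Source B): pass 1 builds the flat dict keyed by the (key, name) pair
-- (setdefault+append = Dict.modify with default []); pass 2 folds over its items reshaping
-- (res.setdefault(k, {})[n] = vals = Dict.modify with default empty inserting n)
def get_dictionaries_for_key_alt (iterable : List (List (String × String))) (key : String) (name : String) (value : String) : List (String × List (String × List String)) :=
  let flat : PySem.Dict (String × String) (List String) :=
    iterable.foldl (fun flat row =>
      match (pvRowB row).get? key with
      | none => flat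
      | some ck =>
        match (pvRowB row).get? name with
        | none => flat
        | some cn =>
          match (pvRowB row).get? value with
          | none => flat
          | some cv => flat.modify (ck, cn) [] (· ++ [cv])) PySem.Dict.empty
  let res : PySem.Dict String (PySem.Dict String (List String)) :=
    flat.items.foldl (fun res p => res.modify p.1.1 PySem.Dict.empty (fun d => d.insert p.1.2 p.2))
      PySem.Dict.empty
  res.items.map (fun p => (p.1, p.2.items))

-- ===== PRECONDITION & SPEC =====
-- Pre_ excludes exactly the inputs on which Python A raises KeyError: a row missing one of the
-- three looked-up keys.
def Pre_get_dictionaries_for_key (iterable : List (List (String × String))) (key : String) (name : String) (value : String) : Prop :=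
  ∀ row ∈ iterable, key ∈ row.map Prod.fst ∧ name ∈ row.map Prod.fst ∧ value ∈ row.map Prod.fst
instance (iterable : List (List (String × String))) (key : String) (name : String) (value : String) : Decidable (Pre_get_dictionaries_for_key iterable key name value) := by unfold Pre_get_dictionaries_for_key; infer_instance
def pvWitness_get_dictionaries_for_key : (List (List (String × String))) × String × String × String :=
  ([[("k", "a"), ("n", "x"), ("v", "1")], [("k", "a"), ("n", "x"), ("v", "2")]], "k", "n", "v")

def Spec_get_dictionaries_for_key (iterable : List (List (String × String))) (key : String) (name : String) (value : String) (out : List (String × List (String × List String))) : Prop := out = get_dictionaries_for_key_alt iterable key name value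
instance (iterable : List (List (String × String))) (key : String) (name : String) (value : String) (out : List (String × List (String × List String))) : Decidable (Spec_get_dictionaries_for_key iterable key name value out) := by unfold Spec_get_dictionaries_for_key; infer_instance

-- ===== CLAIM (what is proved, stated in full; the proofs are below) =====
def Claim_equal_get_dictionaries_for_key : Prop := ∀ (iterable : List (List (String × String))) (key : String) (name : String) (value : String), Dom_get_dictionaries_for_key iterable key name value → Pre_get_dictionaries_for_key iterable key name value → Spec_get_dictionaries_for_key iterable key name value (get_dictionaries_for_key iterable key name value)


-- ===== LEMMAS AND PROOFS =====

-- named copies of the two fold bodies (definitionally equal to the lambdas in the ports)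
def pvStepA (key name value : String)
    (res : PySem.Dict String (PySem.Dict String (List String))) (row : List (String × String)) :
    PySem.Dict String (PySem.Dict String (List String)) :=
  match (pvRowA row).get? key, (pvRowA row).get? name, (pvRowA row).get? value with
  | some ck, some cn, some cv =>
    if res.contains ck = false then
      res.insert ck (PySem.Dict.ofList [(cn, [cv])])
    else if (res.getD ck PySem.Dict.empty).contains cn then
      res.modify ck PySem.Dict.empty (fun d => d.modify cn [] (· ++ [cv]))
    else
      res.modify ck PySem.Dict.empty (fun d => d.insert cn [cv])
  | _, _, _ => res

def pvStepB (key name value : String)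
    (flat : PySem.Dict (String × String) (List String)) (row : List (String × String)) :
    PySem.Dict (String × String) (List String) :=
  match (pvRowB row).get? key with
  | none => flat
  | some ck =>
    match (pvRowB row).get? name with
    | none => flat
    | some cn =>
      match (pvRowB row).get? value with
      | none => flat
      | some cv => flat.modify (ck, cn) [] (· ++ [cv])

lemma pv_rowBA (row : List (String × String)) : pvRowB row = pvRowA row := rfl

def pvG (res : PySem.Dict String (PySem.Dict String (List String)))
    (p : (String × String) × List String) : PySem.Dict String (PySem.Dict String (List String)) :=
  res.modify p.1.1 PySem.Dict.empty (fun d => d.insert p.1.2 p.2)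

def pvM (k n v : String) (res : PySem.Dict String (PySem.Dict String (List String))) :
    PySem.Dict String (PySem.Dict String (List String)) :=
  res.modify k PySem.Dict.empty (fun d => d.modify n [] (· ++ [v]))

-- two inserts at distinct keys, the first key already present: the items lists coincide
lemma pv_insert_comm {kappa nu : Type} [BEq kappa] [LawfulBEq kappa] (d : PySem.Dict kappa nu)
    (k k' : kappa) (v w : nu) (hk : d.contains k = true) (hne : k' ≠ k) :
    (d.insert k v).insert k' w = (d.insert k' w).insert k v := by
  have hbne : (k' == k) = false := beq_eq_false_iff_ne.mpr hne
  have hbne' : (k == k') = false := beq_eq_false_iff_ne.mpr (Ne.symm hne)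
  have hck' : (d.insert k v).contains k' = d.contains k' := by
    rw [PySem.Dict.contains_insert, hbne, Bool.false_or]
  have hck : (d.insert k' w).contains k = true := by
    rw [PySem.Dict.contains_insert, hk, Bool.or_true]
  apply PySem.Dict.ext
  by_cases h2 : d.contains k' = true
  · rw [PySem.Dict.items_insert_of_contains _ w (hck'.trans h2),
        PySem.Dict.items_insert_of_contains _ v hk,
        PySem.Dict.items_insert_of_contains _ v hck,
        PySem.Dict.items_insert_of_contains _ w h2, List.map_map, List.map_map]
    apply List.map_congr_left
    intro p _
    by_cases hpk : p.1 = k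
    · simp [Function.comp, hpk, hbne']
    · by_cases hpk' : p.1 = k'
      · simp [Function.comp, hpk', hbne]
      · simp [Function.comp, beq_eq_false_iff_ne.mpr hpk, beq_eq_false_iff_ne.mpr hpk']
  · have h2' : d.contains k' = false := by simpa using h2
    rw [PySem.Dict.items_insert_of_not_contains _ w (hck'.trans h2'),
        PySem.Dict.items_insert_of_contains _ v hk,
        PySem.Dict.items_insert_of_contains _ v hck,
        PySem.Dict.items_insert_of_not_contains _ w h2', List.map_append]
    simp [hbne]

-- two modifies at distinct keys, the first key present, commute
lemma pv_modify_comm {kappa nu : Type} [BEq kappa] [LawfulBEq kappa] (d : PySem.Dict kappa nu)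
    (k k' : kappa) (e e' : nu) (f f' : nu → nu) (hk : d.contains k = true) (hne : k' ≠ k) :
    (d.modify k e f).modify k' e' f' = (d.modify k' e' f').modify k e f := by
  simp only [PySem.Dict.modify]
  rw [PySem.Dict.getD_insert_of_ne _ _ _ hne, PySem.Dict.getD_insert_of_ne _ _ _ (Ne.symm hne)]
  exact pv_insert_comm d k k' _ _ hk hne

lemma pv_contains_fold (L : List ((String × String) × List String))
    (res0 : PySem.Dict String (PySem.Dict String (List String))) (k : String) :
    (L.foldl pvG res0).contains k = (res0.contains k || L.any (fun p => p.1.1 == k)) := by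
  induction L generalizing res0 with
  | nil => simp
  | cons p rest ih =>
    simp only [List.foldl_cons, List.any_cons, ih, pvG, PySem.Dict.contains_modify]
    cases h : (p.1.1 == k) with
    | true =>
      have h' : (k == p.1.1) = true := by rw [beq_iff_eq]; exact (eq_of_beq h).symm
      simp [h']
    | false =>
      have h' : (k == p.1.1) = false := by
        rw [beq_eq_false_iff_ne]; intro e; rw [e] at h; simp at h
      simp [h']

lemma pv_inner_fold (L : List ((String × String) × List String))
    (res0 : PySem.Dict String (PySem.Dict String (List String))) (k n : String) :
    ((L.foldl pvG res0).getD k PySem.Dict.empty).contains n =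
      ((res0.getD k PySem.Dict.empty).contains n || L.any (fun p => p.1 == (k, n))) := by
  induction L generalizing res0 with
  | nil => simp
  | cons p rest ih =>
    obtain ⟨⟨pk, pn⟩, pv⟩ := p
    simp only [List.foldl_cons, List.any_cons, ih]
    have hstep : ((pvG res0 ((pk, pn), pv)).getD k PySem.Dict.empty).contains n =
        ((res0.getD k PySem.Dict.empty).contains n || ((pk, pn) == (k, n))) := by
      by_cases hpk : pk = k
      · subst hpk
        simp only [pvG, PySem.Dict.getD_modify_self, PySem.Dict.contains_insert]
        by_cases hn : n = pn
        · subst hn; simp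
        · have h1 : (n == pn) = false := beq_eq_false_iff_ne.mpr hn
          have h2 : (((pk, pn) : String × String) == (pk, n)) = false :=
            beq_eq_false_iff_ne.mpr (by intro h; injection h with _ h2; exact hn h2.symm)
          simp [h1, h2]
      · simp only [pvG]
        rw [PySem.Dict.getD_modify_of_ne _ _ _ (fun h => hpk h.symm)]
        have h2 : (((pk, pn) : String × String) == (k, n)) = false :=
          beq_eq_false_iff_ne.mpr (by intro h; injection h with h1 _; exact hpk h1)
        simp [h2]
    rw [hstep]
    cases hb : ((pk, pn) == (k, n)) <;> simp [Bool.or_comm]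

lemma pv_step_eq (k n v : String) (vs : List String)
    (res0 : PySem.Dict String (PySem.Dict String (List String))) :
    pvG res0 ((k, n), vs ++ [v]) = pvM k n v (pvG res0 ((k, n), vs)) := by
  simp only [pvG, pvM, PySem.Dict.modify, PySem.Dict.getD_insert_self,
    PySem.Dict.insert_insert_self, PySem.Dict.getD_insert_self]

lemma pv_comm_fold (k n v : String) (rest : List ((String × String) × List String))
    (hrest : ∀ p ∈ rest, p.1 ≠ ((k, n) : String × String)) :
    ∀ res : PySem.Dict String (PySem.Dict String (List String)), res.contains k = true →
      ((res.getD k PySem.Dict.empty).contains n = true) →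
      rest.foldl pvG (pvM k n v res) = pvM k n v (rest.foldl pvG res) := by
  induction rest with
  | nil => intro res _ _; rfl
  | cons p rest ih =>
    intro res hk hn
    obtain ⟨⟨pk, pn⟩, pv⟩ := p
    have hpne : ((pk, pn) : String × String) ≠ (k, n) := hrest _ (List.mem_cons_self ..)
    have hswap : pvG (pvM k n v res) ((pk, pn), pv) = pvM k n v (pvG res ((pk, pn), pv)) := by
      by_cases hpk : pk = k
      · subst hpk
        have hpn : pn ≠ n := by intro h; exact hpne (by rw [h])
        simp only [pvG, pvM, PySem.Dict.modify, PySem.Dict.getD_insert_self,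
          PySem.Dict.insert_insert_self]
        congr 1
        have hAn : (res.getD pk PySem.Dict.empty).contains n = true := hn
        have h1 : ((res.getD pk PySem.Dict.empty).modify n [] (· ++ [v])).insert pn pv =
            ((res.getD pk PySem.Dict.empty).insert pn pv).modify n [] (· ++ [v]) := by
          have : ∀ (d : PySem.Dict String (List String)),
              d.insert pn pv = d.modify pn pv (fun _ => pv) := by
            intro d; simp [PySem.Dict.modify]
          rw [this, this, pv_modify_comm _ n pn _ _ _ _ hAn hpn]
        simp only [PySem.Dict.modify] at h1 ⊢
        exact h1
      · simp only [pvG, pvM]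
        exact (pv_modify_comm res k pk _ _ _ _ hk hpk)
    have hk' : (pvG res ((pk, pn), pv)).contains k = true := by
      simp only [pvG, PySem.Dict.contains_modify, hk, Bool.or_true]
    have hn' : ((pvG res ((pk, pn), pv)).getD k PySem.Dict.empty).contains n = true := by
      by_cases hpk : k = pk
      · subst hpk
        simp only [pvG, PySem.Dict.getD_modify_self, PySem.Dict.contains_insert, hn, Bool.or_true]
      · simp only [pvG]
        rw [PySem.Dict.getD_modify_of_ne _ _ _ hpk]
        exact hn
    simp only [List.foldl_cons, hswap]
    exact ih (fun q hq => hrest q (List.mem_cons_of_mem _ hq)) _ hk' hn'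

lemma pv_core (k n v : String) (vs W : List String) (hW : W = vs ++ [v]) :
    ∀ (L : List ((String × String) × List String))
      (res0 : PySem.Dict String (PySem.Dict String (List String))),
      (L.map (fun p => p.1)).Nodup → ((k, n), vs) ∈ L →
      (L.map (fun p => if p.1 == ((k, n) : String × String) then ((k, n), W) else p)).foldl pvG res0 =
        pvM k n v (L.foldl pvG res0) := by
  intro L
  induction L with
  | nil => intro res0 _ hmem; cases hmem
  | cons p rest ih =>
    intro res0 hnd hmem
    obtain ⟨⟨pk, pn⟩, pv⟩ := p
    have hndr : (rest.map (fun p => p.1)).Nodup := (List.nodup_cons.mp hnd).2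
    have hnotin : ((pk, pn) : String × String) ∉ rest.map (fun p => p.1) :=
      (List.nodup_cons.mp hnd).1
    by_cases hp : ((pk, pn) : String × String) = (k, n)
    · have hpeq : ((pk, pn), pv) = (((k, n) : String × String), vs) := by
        cases hmem with
        | head => rfl
        | tail _ hm =>
          exact absurd (hp ▸ List.mem_map_of_mem hm) hnotin
      have hrest_id :
          rest.map (fun p => if p.1 == ((k, n) : String × String) then ((k, n), W) else p) = rest := by
        have : ∀ q ∈ rest,
            (if q.1 == ((k, n) : String × String) then (((k, n) : String × String), W) else q) = q := by
          intro q hq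
          have : q.1 ≠ ((k, n) : String × String) := by
            intro h
            exact hnotin (hp ▸ h ▸ List.mem_map_of_mem hq)
          simp [beq_eq_false_iff_ne.mpr this]
        rw [List.map_congr_left this]; simp
      rw [List.map_cons]
      rw [show (if ((pk, pn) : String × String) == ((k, n) : String × String)
            then (((k, n) : String × String), W) else ((pk, pn), pv)) = ((k, n), W) by
        simp [hp]]
      rw [hrest_id]
      injection hpeq with h1 h2
      subst h2
      rw [List.foldl_cons, List.foldl_cons, h1, hW, pv_step_eq]
      apply pv_comm_fold
      · intro q hq hqe
        exact hnotin (hp ▸ hqe ▸ List.mem_map_of_mem hq)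
      · simp only [pvG, PySem.Dict.contains_modify]; simp
      · simp only [pvG, PySem.Dict.getD_modify_self, PySem.Dict.contains_insert]; simp
    · have hmem' : (((k, n) : String × String), vs) ∈ rest := by
        cases hmem with
        | head => exact absurd rfl hp
        | tail _ hm => exact hm
      rw [List.map_cons,
        show (if ((pk, pn) : String × String) == ((k, n) : String × String)
            then (((k, n) : String × String), W) else ((pk, pn), pv)) = ((pk, pn), pv) by
          simp [beq_eq_false_iff_ne.mpr hp],
        List.foldl_cons, List.foldl_cons]
      exact ih _ hndr hmem'

lemma pv_stepLemma (flat : PySem.Dict (String × String) (List String)) (ck cn cv : String)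
    (hnd : flat.keys.Nodup) :
    ((flat.modify ((ck, cn) : String × String) [] (· ++ [cv])).items.foldl pvG PySem.Dict.empty) =
      (let res := flat.items.foldl pvG PySem.Dict.empty
       if res.contains ck = false then
         res.insert ck (PySem.Dict.ofList [(cn, [cv])])
       else if (res.getD ck PySem.Dict.empty).contains cn then
         res.modify ck PySem.Dict.empty (fun d => d.modify cn [] (· ++ [cv]))
       else
         res.modify ck PySem.Dict.empty (fun d => d.insert cn [cv])) := by
  by_cases hc : flat.contains ((ck, cn) : String × String) = true
  · have hg := hc
    rw [PySem.Dict.contains_eq_isSome_get?] at hg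
    cases hget : flat.get? ((ck, cn) : String × String) with
    | none => rw [hget] at hg; simp at hg
    | some vs =>
      have hmem : (((ck, cn) : String × String), vs) ∈ flat.items :=
        PySem.Dict.mem_items_of_get?_eq_some _ hget
      have hgetD : flat.getD ((ck, cn) : String × String) [] = vs :=
        PySem.Dict.getD_of_get?_eq_some _ _ hget
      have hck : (flat.items.foldl pvG PySem.Dict.empty).contains ck = true := by
        rw [pv_contains_fold]
        have : flat.items.any (fun p => p.1.1 == ck) = true :=
          List.any_eq_true.mpr ⟨_, hmem, by simp⟩
        simp [this]
      have hcn : ((flat.items.foldl pvG PySem.Dict.empty).getD ck PySem.Dict.empty).contains cn = true := by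
        rw [pv_inner_fold]
        have : flat.items.any (fun p => p.1 == ((ck, cn) : String × String)) = true :=
          List.any_eq_true.mpr ⟨_, hmem, by simp⟩
        simp [this]
      have hitems : (flat.modify ((ck, cn) : String × String) [] (· ++ [cv])).items =
          flat.items.map (fun p => if p.1 == ((ck, cn) : String × String)
            then (((ck, cn) : String × String), vs ++ [cv]) else p) := by
        simp only [PySem.Dict.modify, hgetD]
        exact PySem.Dict.items_insert_of_contains flat _ hc
      rw [hitems, pv_core ck cn cv vs (vs ++ [cv]) rfl flat.items PySem.Dict.empty hnd hmem]
      simp [pvM, hck, hcn]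
  · have hc' : flat.contains ((ck, cn) : String × String) = false := by simpa using hc
    have hitems : (flat.modify ((ck, cn) : String × String) [] (· ++ [cv])).items =
        flat.items ++ [(((ck, cn) : String × String), [cv])] := by
      simp only [PySem.Dict.modify, PySem.Dict.getD_of_not_contains flat _ hc', List.nil_append]
      exact PySem.Dict.items_insert_of_not_contains flat _ hc'
    rw [hitems, List.foldl_append]
    by_cases hck : (flat.items.foldl pvG PySem.Dict.empty).contains ck = true
    · have hcn : ((flat.items.foldl pvG PySem.Dict.empty).getD ck PySem.Dict.empty).contains cn = false := by
        rw [pv_inner_fold]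
        have : flat.items.any (fun p => p.1 == ((ck, cn) : String × String)) = false := by
          simpa [PySem.Dict.contains] using hc'
        simp [this]
      simp only [List.foldl_cons, List.foldl_nil, pvG]
      rw [if_neg (by simp [hck]), if_neg (by simp [hcn])]
    · have hck' : (flat.items.foldl pvG PySem.Dict.empty).contains ck = false := by simpa using hck
      simp only [List.foldl_cons, List.foldl_nil, pvG]
      rw [if_pos hck']
      simp only [PySem.Dict.modify, PySem.Dict.getD_of_not_contains _ _ hck']
      rfl

lemma pv_main (key name value : String) : ∀ (rows : List (List (String × String)))
    (flat : PySem.Dict (String × String) (List String)), flat.keys.Nodup →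
    ((rows.foldl (pvStepB key name value) flat).items.foldl pvG PySem.Dict.empty) =
      rows.foldl (pvStepA key name value) (flat.items.foldl pvG PySem.Dict.empty) := by
  intro rows
  induction rows with
  | nil => intro flat _; rfl
  | cons row rows ih =>
    intro flat hnd
    rw [List.foldl_cons, List.foldl_cons]
    cases hk : (pvRowB row).get? key with
    | none =>
      have hB : pvStepB key name value flat row = flat := by simp [pvStepB, hk]
      have hA : ∀ res, pvStepA key name value res row = res := by intro res; simp [pvStepA, ← pv_rowBA, hk]
      rw [hB, hA]; exact ih flat hnd
    | some ck =>
      cases hn : (pvRowB row).get? name with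
      | none =>
        have hB : pvStepB key name value flat row = flat := by simp [pvStepB, hk, hn]
        have hA : ∀ res, pvStepA key name value res row = res := by
          intro res; simp [pvStepA, ← pv_rowBA, hk, hn]
        rw [hB, hA]; exact ih flat hnd
      | some cn =>
        cases hv : (pvRowB row).get? value with
        | none =>
          have hB : pvStepB key name value flat row = flat := by simp [pvStepB, hk, hn, hv]
          have hA : ∀ res, pvStepA key name value res row = res := by
            intro res; simp [pvStepA, ← pv_rowBA, hk, hn, hv]
          rw [hB, hA]; exact ih flat hnd
        | some cv =>
          have hB : pvStepB key name value flat row =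
              flat.modify ((ck, cn) : String × String) [] (· ++ [cv]) := by
            simp [pvStepB, hk, hn, hv]
          have hnd' : (flat.modify ((ck, cn) : String × String) [] (· ++ [cv])).keys.Nodup := by
            simp only [PySem.Dict.modify]
            exact PySem.Dict.nodup_keys_insert _ _ _ hnd
          rw [hB, ih _ hnd']
          congr 1
          have hA : pvStepA key name value (flat.items.foldl pvG PySem.Dict.empty) row =
              (let res := flat.items.foldl pvG PySem.Dict.empty
               if res.contains ck = false then
                 res.insert ck (PySem.Dict.ofList [(cn, [cv])])
               else if (res.getD ck PySem.Dict.empty).contains cn then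
                 res.modify ck PySem.Dict.empty (fun d => d.modify cn [] (· ++ [cv]))
               else
                 res.modify ck PySem.Dict.empty (fun d => d.insert cn [cv])) := by
            simp [pvStepA, ← pv_rowBA, hk, hn, hv]
          rw [hA, ← pv_stepLemma flat ck cn cv hnd]

-- ===== VERDICT (by name: the statement is the Claim_ definition above) =====
theorem get_dictionaries_for_key_spec : Claim_equal_get_dictionaries_for_key := by
  intro iterable key name value _ _
  show get_dictionaries_for_key iterable key name value =
    get_dictionaries_for_key_alt iterable key name value
  show (iterable.foldl (pvStepA key name value) PySem.Dict.empty).items.map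
      (fun p => (p.1, p.2.items)) =
    ((iterable.foldl (pvStepB key name value) PySem.Dict.empty).items.foldl pvG
        PySem.Dict.empty).items.map (fun p => (p.1, p.2.items))
  rw [pv_main key name value iterable PySem.Dict.empty PySem.Dict.nodup_keys_empty]
  rfl
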